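-- pv_equiv track=rewrite | github.com/Klaudiusz321/Searching-system | Data-structures/src/query.py | check_phrase_sequence
-- ===== SOURCE A (Python) =====
-- def check_phrase_sequence(positions_list):
--
--     for p in positions_list[0]:
--         match = True
--         for offset in range(1, len(positions_list)):
--             if (p + offset) not in positions_list[offset]:
--                 match = False
--                 break
--         if match:
--             return True
--     return False
-- ===== SOURCE B (Python) =====
-- def check_phrase_sequence(positions_list):
--     candidates = set(positions_list[0])
--     for offset in range(1, len(positions_list)):
--         candidates &= {x - offset for x in positions_list[offset]}
--         if not candidates:
--             break
--     return bool(candidates)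
-- ===== Notes on version B (the rewrite author's own statement) =====
-- stated objective: alternative
-- what changed: Inverts the nested scan: instead of testing each start p from the first list against every later list, B maintains a candidate set of starts and intersects it with each later list shifted by its offset, breaking early when empty.
import Mathlib
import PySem

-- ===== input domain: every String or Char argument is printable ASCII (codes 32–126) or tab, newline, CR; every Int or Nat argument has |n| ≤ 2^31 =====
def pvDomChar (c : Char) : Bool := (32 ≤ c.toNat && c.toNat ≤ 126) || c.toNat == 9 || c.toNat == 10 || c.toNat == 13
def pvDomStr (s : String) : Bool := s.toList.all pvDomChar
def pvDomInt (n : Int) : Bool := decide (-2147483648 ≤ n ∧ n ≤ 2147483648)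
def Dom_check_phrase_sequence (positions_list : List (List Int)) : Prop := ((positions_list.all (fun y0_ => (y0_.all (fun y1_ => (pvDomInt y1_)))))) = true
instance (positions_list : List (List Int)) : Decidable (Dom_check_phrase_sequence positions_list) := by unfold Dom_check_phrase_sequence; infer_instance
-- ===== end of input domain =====

-- B inverts A's nested scan into candidate-set narrowing by intersection (alternative decomposition, not claimed faster); equal return values on every non-empty positions_list (both raise IndexError on []).

-- ===== PORT A =====
-- A: for p in positions_list[0]: the flag-and-break inner loop over range(1, len) is 'all';
-- positions_list[offset] is always in range there, so pyGetD with default [] is exact.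
def check_phrase_sequence (positions_list : List (List Int)) : Bool :=
  match positions_list with
  | [] => false   -- Python: positions_list[0] raises IndexError; excluded by Pre_
  | first :: _ =>
    first.any (fun p =>
      (PySem.List.pyRange 1 positions_list.length 1).all (fun offset =>
        (PySem.List.pyGetD positions_list offset []).contains (p + offset)))

-- ===== PORT B =====
-- the loop 'for offset in range(1, len): candidates &= {x - offset for x in positions_list[offset]}; break if empty'
def pvAltLoop (ls : List (List Int)) (offset : Int) (cands : PySem.Set Int) : PySem.Set Int :=
  match ls with
  | [] => cands
  | l :: rest =>
    let c := PySem.Set.inter cands (PySem.Set.ofList (l.map (fun x => x - offset)))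
    if c.isEmpty then c else pvAltLoop rest (offset + 1) c

def check_phrase_sequence_alt (positions_list : List (List Int)) : Bool :=
  match positions_list with
  | [] => false   -- Python: positions_list[0] raises IndexError; excluded by Pre_
  | first :: rest => !(pvAltLoop rest 1 (PySem.Set.ofList first)).isEmpty

-- ===== PRECONDITION & SPEC =====
-- Pre_ excludes only the empty list, on which both A and B raise IndexError at positions_list[0].
def Pre_check_phrase_sequence (positions_list : List (List Int)) : Prop := positions_list ≠ []
instance (positions_list : List (List Int)) : Decidable (Pre_check_phrase_sequence positions_list) := by unfold Pre_check_phrase_sequence; infer_instance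
def pvWitness_check_phrase_sequence : List (List Int) := [[0, 2], [1]]

def Spec_check_phrase_sequence (positions_list : List (List Int)) (out : Bool) : Prop := out = check_phrase_sequence_alt positions_list
instance (positions_list : List (List Int)) (out : Bool) : Decidable (Spec_check_phrase_sequence positions_list out) := by unfold Spec_check_phrase_sequence; infer_instance

-- ===== CLAIM (what is proved, stated in full; the proofs are below) =====
def Claim_equal_check_phrase_sequence : Prop := ∀ (positions_list : List (List Int)), Dom_check_phrase_sequence positions_list → Pre_check_phrase_sequence positions_list → Spec_check_phrase_sequence positions_list (check_phrase_sequence positions_list)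

-- ===== LEMMAS AND PROOFS =====

-- membership invariant of B's narrowing loop (break-on-empty included: the empty result is already the full filter)
lemma mem_pvAltLoop (ls : List (List Int)) (offset : Int) (cands : PySem.Set Int) (x : Int) :
    x ∈ pvAltLoop ls offset cands ↔
      x ∈ cands ∧ ∀ i : Nat, (h : i < ls.length) → x + offset + (i : Int) ∈ ls[i] := by
  induction ls generalizing offset cands with
  | nil => simp [pvAltLoop]
  | cons l rest ih =>
    have hc : ∀ y : Int,
        y ∈ PySem.Set.inter cands (PySem.Set.ofList (l.map (fun x => x - offset))) ↔
          y ∈ cands ∧ y + offset ∈ l := by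
      intro y
      simp only [PySem.Set.mem_inter, PySem.Set.mem_ofList, List.mem_map]
      constructor
      · rintro ⟨hy, z, hz, rfl⟩; exact ⟨hy, by simpa using hz⟩
      · rintro ⟨hy, hz⟩; exact ⟨hy, y + offset, hz, by ring⟩
    simp only [pvAltLoop]
    split
    · rename_i hempty
      have hnil : PySem.Set.inter cands (PySem.Set.ofList (l.map (fun x => x - offset))) = [] :=
        List.isEmpty_iff.mp hempty
      constructor
      · intro hx; exact absurd hx (by simp [hnil])
      · rintro ⟨hx, hall⟩
        have h0 := hall 0 (by simp)
        have : x ∈ PySem.Set.inter cands (PySem.Set.ofList (l.map (fun x => x - offset))) :=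
          (hc x).mpr ⟨hx, by simpa using h0⟩
        simp [hnil] at this
    · rw [ih, hc]
      constructor
      · rintro ⟨⟨hx, h0⟩, hall⟩
        refine ⟨hx, ?_⟩
        intro i hi
        cases i with
        | zero => simpa using h0
        | succ j =>
          have := hall j (by simpa using hi)
          have heq : x + offset + ((j + 1 : Nat) : Int) = x + (offset + 1) + (j : Int) := by
            push_cast; ring
          rw [heq]
          simpa using this
      · rintro ⟨hx, hall⟩
        refine ⟨⟨hx, by simpa using hall 0 (by simp)⟩, ?_⟩
        intro j hj
        have := hall (j + 1) (by simpa using hj)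
        have heq : x + offset + ((j + 1 : Nat) : Int) = x + (offset + 1) + (j : Int) := by
          push_cast; ring
        rw [← heq]
        simpa using this

-- A's value on a non-empty list, as an existential
lemma check_A_iff (first : List Int) (rest : List (List Int)) :
    check_phrase_sequence (first :: rest) = true ↔
      ∃ p ∈ first, ∀ i : Nat, (h : i < rest.length) → p + 1 + (i : Int) ∈ rest[i] := by
  simp only [check_phrase_sequence, List.any_eq_true, List.all_eq_true]
  constructor
  · rintro ⟨p, hp, hall⟩
    refine ⟨p, hp, ?_⟩
    intro i hi
    have hmem : (1 + (i : Int)) ∈ PySem.List.pyRange 1 (first :: rest).length 1 := by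
      rw [PySem.List.mem_pyRange_one]
      constructor
      · omega
      · simp only [List.length_cons]; push_cast; omega
    have := hall _ hmem
    have hget : PySem.List.pyGetD (first :: rest) (1 + (i : Int)) [] = rest[i] := by
      have : (1 + (i : Int)) = ((i + 1 : Nat) : Int) := by push_cast; ring
      rw [this, PySem.List.pyGetD_natCast]
      simp [List.getD, hi]
    rw [hget] at this
    simpa [add_assoc] using this
  · rintro ⟨p, hp, hall⟩
    refine ⟨p, hp, ?_⟩
    intro o ho
    rw [PySem.List.mem_pyRange_one] at ho
    obtain ⟨h1, h2⟩ := ho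
    simp only [List.length_cons] at h2
    -- o = 1 + i for some i < rest.length
    obtain ⟨i, hi, rfl⟩ : ∃ i : Nat, i < rest.length ∧ o = 1 + (i : Int) := by
      refine ⟨(o - 1).toNat, ?_, ?_⟩ <;> omega
    have := hall i hi
    have hget : PySem.List.pyGetD (first :: rest) (1 + (i : Int)) [] = rest[i] := by
      have : (1 + (i : Int)) = ((i + 1 : Nat) : Int) := by push_cast; ring
      rw [this, PySem.List.pyGetD_natCast]
      simp [List.getD, hi]
    rw [hget]
    simpa [add_assoc] using this

-- B's value on a non-empty list, as the same existential
lemma check_B_iff (first : List Int) (rest : List (List Int)) :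
    check_phrase_sequence_alt (first :: rest) = true ↔
      ∃ p ∈ first, ∀ i : Nat, (h : i < rest.length) → p + 1 + (i : Int) ∈ rest[i] := by
  simp only [check_phrase_sequence_alt, Bool.not_eq_true', List.isEmpty_eq_false_iff]
  constructor
  · intro h
    obtain ⟨x, hx⟩ := List.exists_mem_of_ne_nil _ h
    rw [mem_pvAltLoop] at hx
    exact ⟨x, (PySem.Set.mem_ofList _ _).mp hx.1, hx.2⟩
  · rintro ⟨p, hp, hall⟩
    intro hnil
    have hm : p ∈ pvAltLoop rest 1 (PySem.Set.ofList first) :=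
      (mem_pvAltLoop _ _ _ _).mpr ⟨(PySem.Set.mem_ofList _ _).mpr hp, hall⟩
    simp [hnil] at hm

-- ===== VERDICT (by name: the statement is the Claim_ definition above) =====
theorem check_phrase_sequence_spec : Claim_equal_check_phrase_sequence := by
  intro positions_list _ hpre
  unfold Spec_check_phrase_sequence
  match positions_list with
  | [] => exact absurd rfl hpre
  | first :: rest =>
    rw [Bool.eq_iff_iff, check_A_iff, check_B_iff]
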